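-- pv_equiv track=rewrite | github.com/kosazna/atsql | topography/test.py | join_stops_for_angle
-- ===== SOURCE A (Python) =====
-- def join_stops_for_angle(stops):
--     joined_stops = []
--     for i, stop in enumerate(stops):
--         if i == 0:
--             pass
--         else:
--             try:
--                 joined_stops.append(f'{stops[i - 1]}-{stop}-{stops[i + 1]}')
--             except IndexError:
--                 pass
--
--     return joined_stops
-- ===== SOURCE B (Python) =====
-- def join_stops_for_angle(stops):
--     pairs = [f'{a}-{b}' for a, b in zip(stops, stops[1:])]
--     return [f'{p}-{c}' for p, c in zip(pairs, stops[2:])]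
-- ===== Notes on version B (the rewrite author's own statement) =====
-- stated objective: alternative
-- what changed: Replaces the index loop with its i==0 guard and try/except IndexError by two staged passes: a first pass builds the adjacent-pair strings 'a-b', a second pass appends the stop two ahead to each pair, so no indices or exception handling remain.
import Mathlib
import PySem

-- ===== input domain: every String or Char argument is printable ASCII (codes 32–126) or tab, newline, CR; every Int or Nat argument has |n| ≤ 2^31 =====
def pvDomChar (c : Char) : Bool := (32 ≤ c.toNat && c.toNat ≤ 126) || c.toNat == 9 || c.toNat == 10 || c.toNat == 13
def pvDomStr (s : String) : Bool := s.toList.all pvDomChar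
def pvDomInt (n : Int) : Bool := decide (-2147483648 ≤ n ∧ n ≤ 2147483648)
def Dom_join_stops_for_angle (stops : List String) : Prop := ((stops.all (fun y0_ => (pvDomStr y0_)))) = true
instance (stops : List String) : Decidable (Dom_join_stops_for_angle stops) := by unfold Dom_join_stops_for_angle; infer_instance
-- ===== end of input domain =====

-- B replaces the index loop (i==0 guard, try/except IndexError) by two staged
-- passes: build adjacent-pair strings, then append the stop two ahead to each pair.

-- ===== PORT A =====
def join_stops_for_angle (stops : List String) : List String :=
  (PySem.List.enumerate stops).foldl
    (fun (joined_stops : List String) (p : Int × String) =>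
      if p.1 = 0 then joined_stops
      else
        match PySem.List.pyGet? stops (p.1 - 1), PySem.List.pyGet? stops (p.1 + 1) with
        | some a, some c => joined_stops ++ [a ++ "-" ++ p.2 ++ "-" ++ c]
        | _, _ => joined_stops)
    []

-- ===== PORT B =====
-- Source B: pass 1 builds pairs = ['a-b' for adjacent a,b]; pass 2 appends stops[2:].
def join_stops_for_angle_alt (stops : List String) : List String :=
  let pairs := (stops.zip (stops.drop 1)).map (fun p => p.1 ++ "-" ++ p.2)
  (pairs.zip (stops.drop 2)).map (fun p => p.1 ++ "-" ++ p.2)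

-- ===== PRECONDITION & SPEC =====
def Spec_join_stops_for_angle (stops : List String) (out : List String) : Prop := out = join_stops_for_angle_alt stops
instance (stops : List String) (out : List String) : Decidable (Spec_join_stops_for_angle stops out) := by unfold Spec_join_stops_for_angle; infer_instance

-- ===== CLAIM (what is proved, stated in full; the proofs are below) =====
def Claim_equal_join_stops_for_angle : Prop := ∀ (stops : List String), Dom_join_stops_for_angle stops → Spec_join_stops_for_angle stops (join_stops_for_angle stops)

-- ===== LEMMAS AND PROOFS =====

-- the interior-triplet list both programs compute (proof helper)
def pvTriples : List String → List String
  | a :: b :: c :: t => (a ++ "-" ++ b ++ "-" ++ c) :: pvTriples (b :: c :: t)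
  | _ => []

-- the body of A's loop as a flatMap step
def pvStep (stops : List String) (p : Int × String) : List String :=
  if p.1 = 0 then []
  else
    match PySem.List.pyGet? stops (p.1 - 1), PySem.List.pyGet? stops (p.1 + 1) with
    | some a, some c => [a ++ "-" ++ p.2 ++ "-" ++ c]
    | _, _ => []

lemma foldl_eq_flatMap (stops : List String) (l : List (Int × String)) (acc : List String) :
    l.foldl
      (fun (joined_stops : List String) (p : Int × String) =>
        if p.1 = 0 then joined_stops
        else
          match PySem.List.pyGet? stops (p.1 - 1), PySem.List.pyGet? stops (p.1 + 1) with
          | some a, some c => joined_stops ++ [a ++ "-" ++ p.2 ++ "-" ++ c]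
          | _, _ => joined_stops)
      acc
    = acc ++ l.flatMap (pvStep stops) := by
  induction l generalizing acc with
  | nil => simp
  | cons p t ih =>
    simp only [List.foldl_cons, List.flatMap_cons, ih, pvStep]
    split_ifs with h
    · simp
    · rcases hA : PySem.List.pyGet? stops (p.1 - 1) with _ | a <;>
        rcases hC : PySem.List.pyGet? stops (p.1 + 1) with _ | c <;> simp

lemma enumerate_flatMap_eq (stops : List String) :
    ∀ (l : List String) (k : Nat), 1 ≤ k → stops.drop k = l →
      (PySem.List.enumerate l (k : Int)).flatMap (pvStep stops)
        = pvTriples (stops.drop (k - 1)) := by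
  intro l
  induction l with
  | nil =>
    intro k hk hdrop
    have hlen : stops.length ≤ k := by
      by_contra h
      exact absurd hdrop (by simp [List.drop_eq_nil_iff]; omega)
    have : stops.length - (k - 1) ≤ 1 := by omega
    rcases hd : stops.drop (k - 1) with _ | ⟨a, _ | ⟨b, t⟩⟩
    · simp [PySem.List.enumerate_nil, pvTriples]
    · simp [PySem.List.enumerate_nil, pvTriples]
    · exfalso
      have := congrArg List.length hd
      simp [List.length_drop] at this
      omega
  | cons x t ih =>
    intro k hk hdrop
    have hklt : k < stops.length := by
      by_contra h
      rw [List.drop_eq_nil_iff.mpr (by omega)] at hdrop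
      exact List.cons_ne_nil x t hdrop.symm
    have hx : stops[k] = x := by
      have := List.drop_eq_getElem_cons hklt
      rw [hdrop] at this
      exact (List.cons.injEq _ _ _ _ ▸ this).1.symm
    have ht : stops.drop (k + 1) = t := by
      have := List.drop_eq_getElem_cons hklt
      rw [hdrop] at this
      exact ((List.cons.injEq _ _ _ _ ▸ this).2).symm
    have hk1 : k - 1 < stops.length := by omega
    have hdropk1 : stops.drop (k - 1) = stops[k - 1] :: x :: t := by
      rw [List.drop_eq_getElem_cons hk1]
      congr 1
      have : k - 1 + 1 = k := by omega
      rw [this, List.drop_eq_getElem_cons hklt, hx, ht]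
    have hcast : (k : Int) + 1 = ((k + 1 : Nat) : Int) := by push_cast; ring
    rw [PySem.List.enumerate_cons, hcast, List.flatMap_cons,
      ih (k + 1) (by omega) ht]
    have hstep : pvStep stops ((k : Int), x)
        = match stops[k + 1]? with
          | some c => [stops[k - 1] ++ "-" ++ x ++ "-" ++ c]
          | none => [] := by
      unfold pvStep
      have h0 : ¬ ((k : Int) = 0) := by simp; omega
      have hm1 : (k : Int) - 1 = ((k - 1 : Nat) : Int) := by omega
      have hp1 : (k : Int) + 1 = ((k + 1 : Nat) : Int) := by omega
      rw [if_neg h0, hm1, hp1, PySem.List.pyGet?_natCast, PySem.List.pyGet?_natCast,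
        List.getElem?_eq_getElem hk1]
      cases stops[k + 1]? <;> rfl
    have hnext : stops[k + 1]? = t.head? := by
      rw [← ht, List.head?_drop]
    rw [hstep, hnext]
    have hsimp : (k + 1 : Nat) - 1 = k := by omega
    rw [hsimp, List.drop_eq_getElem_cons hklt, hx, ht, hdropk1]
    cases t with
    | nil => simp [pvTriples]
    | cons c t' => simp [pvTriples]

lemma a_eq_triples (stops : List String) :
    join_stops_for_angle stops = pvTriples stops := by
  unfold join_stops_for_angle
  rw [foldl_eq_flatMap, List.nil_append]
  cases stops with
  | nil => simp [PySem.List.enumerate_nil, pvTriples]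
  | cons x t =>
    rw [PySem.List.enumerate_cons, List.flatMap_cons]
    have h0 : pvStep (x :: t) ((0 : Int), x) = [] := by simp [pvStep]
    have h1 : (0 : Int) + 1 = ((1 : Nat) : Int) := by norm_num
    rw [h0, List.nil_append, h1,
      enumerate_flatMap_eq (x :: t) t 1 (le_refl 1) rfl]
    rfl

lemma b_eq_triples : (stops : List String) → join_stops_for_angle_alt stops = pvTriples stops
  | [] => rfl
  | [_] => rfl
  | [_, _] => rfl
  | a :: b :: c :: t => by
    have ih := b_eq_triples (b :: c :: t)
    simp only [join_stops_for_angle_alt, pvTriples, List.drop_succ_cons, List.drop_zero,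
      List.zip_cons_cons, List.map_cons] at *
    exact congrArg _ ih

-- ===== VERDICT (by name: the statement is the Claim_ definition above) =====
theorem join_stops_for_angle_spec : Claim_equal_join_stops_for_angle := by
  intro stops _
  unfold Spec_join_stops_for_angle
  rw [a_eq_triples, b_eq_triples]
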